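-- pv_equiv track=rewrite | github.com/jkkummerfeld/1ec-graph-parser | parser/nn-tagger/pre-process.py | map_token
-- ===== SOURCE A (Python) =====
-- import string
--
-- def map_token(token, pos):
--     # Lowercase
--     token = token.lower()
--     # Alternatives:
--     # - Just change the case of the first letter of the first word
--     # - Also, leave it as is if we've seen this capitalised elsewhere
--
--     # Replace numbers
--     letters = []
--     for letter in token:
--         if letter in string.digits:
--             if len(letters) > 0 and letters[-1] == '0':
--                 continue
--             else:
--                 letters.append("0")
--         else:
--             letters.append(letter)
--     token = ''.join(letters)
--
--     # Do the suffix trick?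
--
--     return token
-- ===== SOURCE B (Python) =====
-- import re
--
-- def map_token(token, pos):
--     # Lowercase, then collapse each run of ASCII digits to a single '0'.
--     return re.sub(r'[0-9]+', '0', token.lower())
-- ===== Notes on version B (the rewrite author's own statement) =====
-- stated objective: idiomatic
-- what changed: Replaced the explicit character loop with last-appended-char state by a single regex substitution collapsing each ASCII digit run to '0' on the lowercased token.
import Mathlib
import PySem

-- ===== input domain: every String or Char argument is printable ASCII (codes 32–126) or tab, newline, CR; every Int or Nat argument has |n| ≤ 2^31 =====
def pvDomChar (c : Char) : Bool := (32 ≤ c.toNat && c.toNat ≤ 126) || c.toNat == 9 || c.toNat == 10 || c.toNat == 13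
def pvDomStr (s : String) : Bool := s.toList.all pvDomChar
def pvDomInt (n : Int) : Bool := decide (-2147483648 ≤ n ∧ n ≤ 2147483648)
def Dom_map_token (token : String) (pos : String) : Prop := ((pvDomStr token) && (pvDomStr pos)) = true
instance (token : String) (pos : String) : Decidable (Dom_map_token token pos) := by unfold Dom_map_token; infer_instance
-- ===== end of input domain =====

-- B replaces A's explicit loop with one regex substitution collapsing digit runs; equivalence of return values is proved (no speed claim).

-- ===== PORT A =====
-- membership test `letter in string.digits` (ASCII digits only)
def pvIsDig (c : Char) : Bool := c ∈ "0123456789".toList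

-- the loop body: append '0' for a digit unless the last appended char is '0', else append the char
def pvStepA (letters : List Char) (letter : Char) : List Char :=
  if pvIsDig letter then
    if letters.getLast? = some '0' then letters else letters ++ ['0']
  else letters ++ [letter]

def map_token (token : String) (pos : String) : String :=
  let t := PySem.Str.lower token
  let letters := t.toList.foldl pvStepA []
  String.mk letters

-- ===== PORT B =====
-- hand port of `re.sub(r'[0-9]+', '0', ...)`: exact — each maximal run of ASCII digits becomes one '0'
def pvCollapse : List Char → List Char
  | [] => []
  | c :: rest =>
    if pvIsDig c then '0' :: pvCollapse (rest.dropWhile pvIsDig)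
    else c :: pvCollapse rest
termination_by l => l.length
decreasing_by
  · have := List.length_dropWhile_le pvIsDig rest
    simp only [List.length_cons]
    omega
  · simp

def map_token_alt (token : String) (pos : String) : String :=
  String.mk (pvCollapse (PySem.Str.lower token).toList)

-- ===== PRECONDITION & SPEC =====
def Spec_map_token (token : String) (pos : String) (out : String) : Prop := out = map_token_alt token pos
instance (token : String) (pos : String) (out : String) : Decidable (Spec_map_token token pos out) := by unfold Spec_map_token; infer_instance

-- ===== CLAIM (what is proved, stated in full; the proofs are below) =====
def Claim_equal_map_token : Prop := ∀ (token : String) (pos : String), Dom_map_token token pos → Spec_map_token token pos (map_token token pos)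

-- ===== LEMMAS AND PROOFS =====

-- Loop invariant: the fold equals acc ++ the collapsed rest, where a trailing '0' in acc
-- swallows a leading digit run of the remainder.
theorem pv_fold_eq (l : List Char) : ∀ (acc : List Char),
    l.foldl pvStepA acc =
      acc ++ (if acc.getLast? = some '0' then pvCollapse (l.dropWhile pvIsDig) else pvCollapse l) := by
  induction l with
  | nil => intro acc; split <;> simp [pvCollapse]
  | cons c rest ih =>
    intro acc
    by_cases hd : pvIsDig c
    · by_cases hz : acc.getLast? = some '0'
      · have hstep : pvStepA acc c = acc := by simp [pvStepA, hd, hz]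
        rw [List.foldl_cons, hstep, ih acc]
        simp [hz, List.dropWhile, hd]
      · have hstep : pvStepA acc c = acc ++ ['0'] := by simp [pvStepA, hd, hz]
        rw [List.foldl_cons, hstep, ih (acc ++ ['0'])]
        simp [hz, pvCollapse, hd]
    · have hcz : c ≠ '0' := by
        intro h; subst h; exact hd (by decide)
      have hstep : pvStepA acc c = acc ++ [c] := by simp [pvStepA, hd]
      rw [List.foldl_cons, hstep, ih (acc ++ [c])]
      have : (acc ++ [c]).getLast? = some c := by simp
      rw [this]
      simp only [hcz, Option.some.injEq, if_false]
      split <;> simp [List.dropWhile, hd, pvCollapse]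

-- ===== VERDICT (by name: the statement is the Claim_ definition above) =====
theorem map_token_spec : Claim_equal_map_token := by
  intro token pos _
  show map_token token pos = map_token_alt token pos
  unfold map_token map_token_alt
  simp only []
  rw [pv_fold_eq]
  simp
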